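-- pv_equiv track=rewrite | github.com/donghaozhang/Leetcode_play | leetcode_questions/graph/sequence_reconstruction/sequence_reconstruction.py | is_unique_sequence
-- ===== SOURCE A (Python) =====
-- from typing import List
-- from collections import defaultdict, deque
--
-- def is_unique_sequence(org: List[int], seqs: List[List[int]]) -> bool:
--     """
--     判断序列是否是唯一的拓扑序
--     :param org: List[int]，目标序列
--     :param seqs: List[List[int]]，子序列列表
--     :return: bool，是否是唯一的拓扑序
--     """
--     # 处理边界情况
--     if not seqs:
--         return not org
--
--     # 构建图和入度表
--     graph = defaultdict(set)
--     indegrees = defaultdict(int)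
--     values = set()
--
--     # 从子序列构建图
--     for seq in seqs:
--         values.update(seq)
--         for i in range(len(seq) - 1):
--             if seq[i] == seq[i + 1]:  # 自环
--                 return False
--             if seq[i + 1] not in graph[seq[i]]:
--                 graph[seq[i]].add(seq[i + 1])
--                 indegrees[seq[i + 1]] += 1
--
--     # 检查节点数是否匹配
--     if len(values) != len(org):
--         return False
--     for value in org:
--         if value not in values:
--             return False
--
--     # BFS检查拓扑序
--     queue = deque([x for x in values if indegrees[x] == 0])
--     index = 0
--
--     while queue:
--         # 如果队列中元素多于1个，说明存在多种可能的拓扑序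
--         if len(queue) != 1:
--             return False
--
--         curr = queue.popleft()
--         if index == len(org) or curr != org[index]:
--             return False
--         index += 1
--
--         # 更新邻居节点的入度
--         for neighbor in graph[curr]:
--             indegrees[neighbor] -= 1
--             if indegrees[neighbor] == 0:
--                 queue.append(neighbor)
--
--     return index == len(org)
-- ===== SOURCE B (Python) =====
-- from typing import List
--
-- def is_unique_sequence(org: List[int], seqs: List[List[int]]) -> bool:
--     # Position-map check: org is the unique topological order of seqs' pairs iff
--     # every consecutive seq pair goes strictly forward in org and every adjacent
--     # org pair is some seq's consecutive pair.  No graph or BFS is built.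
--     if not seqs:
--         return not org
--     pos = {v: i for i, v in enumerate(org)}
--     if len(pos) != len(org):
--         return False
--     vals = set()
--     for seq in seqs:
--         vals.update(seq)
--     if len(vals) != len(org) or any(v not in pos for v in vals):
--         return False
--     covered = [False] * (len(org) - 1)
--     for seq in seqs:
--         for a, b in zip(seq, seq[1:]):
--             if pos[a] >= pos[b]:
--                 return False
--             if pos[b] == pos[a] + 1:
--                 covered[pos[a]] = True
--     return all(covered)
-- ===== Notes on version B (the rewrite author's own statement) =====
-- stated objective: simpler
-- what changed: A builds an adjacency-set graph plus indegree table and runs Kahn's BFS requiring a singleton queue at every step; B builds only a value->position map and makes one pass over the consecutive pairs of seqs, rejecting any pair that does not go strictly forward in org and marking adjacent org pairs as covered, returning True iff every adjacent position is covered.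
import Mathlib
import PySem

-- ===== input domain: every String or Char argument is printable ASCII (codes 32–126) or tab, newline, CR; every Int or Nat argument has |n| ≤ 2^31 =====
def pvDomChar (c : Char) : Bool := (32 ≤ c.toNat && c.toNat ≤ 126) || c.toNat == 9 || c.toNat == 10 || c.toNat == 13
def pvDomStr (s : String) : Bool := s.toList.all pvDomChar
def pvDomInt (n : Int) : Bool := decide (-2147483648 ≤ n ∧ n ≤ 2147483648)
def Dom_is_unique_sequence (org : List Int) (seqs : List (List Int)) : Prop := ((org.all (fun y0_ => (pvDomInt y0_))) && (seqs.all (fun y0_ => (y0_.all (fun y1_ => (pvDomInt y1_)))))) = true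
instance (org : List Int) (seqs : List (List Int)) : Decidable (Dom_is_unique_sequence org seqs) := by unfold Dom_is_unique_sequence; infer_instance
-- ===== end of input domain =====

-- B replaces A's graph + indegree + Kahn BFS with a single position-map pass over the
-- consecutive pairs of seqs (objective: simpler/alternative; equivalence proved below).

-- ===== PORT A =====
-- One step of A's edge-building inner loop (self-loop returns False ⇒ state none).
def pvStepPairA (st : Option (PySem.Dict Int (PySem.Set Int) × PySem.Dict Int Int)) (a b : Int) :
    Option (PySem.Dict Int (PySem.Set Int) × PySem.Dict Int Int) :=
  match st with
  | none => none
  | some (graph, indeg) =>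
    if a = b then none
    else
      let s := graph.getD a PySem.Set.empty
      if PySem.Set.contains s b then some (graph, indeg)
      else some (graph.insert a (PySem.Set.add s b), indeg.modify b 0 (· + 1))

-- A's build loop: `for seq in seqs: values.update(seq); for i in range(len(seq)-1): …`.
-- (Python's defaultdict read `graph[seq[i]]` may insert an empty set; only getD-lookups
-- are used afterwards, so reading with getD is value-equivalent.)
def pvBuildStepA (st : Option (PySem.Dict Int (PySem.Set Int) × PySem.Dict Int Int × PySem.Set Int))
    (seq : List Int) :
    Option (PySem.Dict Int (PySem.Set Int) × PySem.Dict Int Int × PySem.Set Int) :=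
  match st with
  | none => none
  | some (graph, indeg, values) =>
    let values := PySem.Set.update values seq
    ((PySem.List.pyRange 0 ((seq.length : Int) - 1)).foldl
        (fun st2 i => pvStepPairA st2 (PySem.List.pyGetD seq i 0) (PySem.List.pyGetD seq (i + 1) 0))
        (some (graph, indeg))).map (fun gd => (gd.1, gd.2, values))

def pvBuildA (seqs : List (List Int)) :
    Option (PySem.Dict Int (PySem.Set Int) × PySem.Dict Int Int × PySem.Set Int) :=
  seqs.foldl pvBuildStepA (some (PySem.Dict.empty, PySem.Dict.empty, PySem.Set.empty))

-- A's `while queue:` loop. Fuel org.length+1 is enough: each iteration either returns or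
-- increments index, and a pop at index = len(org) returns False.
def pvBFSA (graph : PySem.Dict Int (PySem.Set Int)) (org : List Int) :
    Nat → List Int → PySem.Dict Int Int → Nat → Bool
  | 0, _, _, index => index == org.length
  | fuel + 1, queue, indeg, index =>
    match queue with
    | [] => index == org.length
    | curr :: rest =>
      if (curr :: rest).length ≠ 1 then false
      else if index = org.length ∨ curr ≠ org.getD index 0 then false
      else
        let st := (graph.getD curr PySem.Set.empty).foldl
          (fun (st : PySem.Dict Int Int × List Int) nb =>
            let d := st.1.insert nb (st.1.getD nb 0 - 1)
            if d.getD nb 0 == 0 then (d, st.2 ++ [nb]) else (d, st.2))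
          (indeg, rest)
        pvBFSA graph org fuel st.2 st.1 (index + 1)

-- Python builds the initial queue by iterating the `values` set (hash order); the loop's
-- result is order-independent (it returns False whenever the queue has ≠ 1 element), so
-- iterating in insertion order is value-equivalent.
def is_unique_sequence (org : List Int) (seqs : List (List Int)) : Bool :=
  if seqs.isEmpty then org.isEmpty
  else
    match pvBuildA seqs with
    | none => false
    | some (graph, indeg, values) =>
      if PySem.Set.len values ≠ (org.length : Int) then false
      else if org.any (fun v => !PySem.Set.contains values v) then false
      else
        let queue := values.filter (fun x => indeg.getD x 0 == 0)
        pvBFSA graph org (org.length + 1) queue indeg 0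

-- ===== PORT B =====
def is_unique_sequence_alt (org : List Int) (seqs : List (List Int)) : Bool :=
  if seqs.isEmpty then org.isEmpty
  else
    let pos : PySem.Dict Int Int :=
      (PySem.List.enumerate org).foldl (fun d p => d.insert p.2 p.1) PySem.Dict.empty
    if pos.size ≠ org.length then false
    else
      let vals := seqs.foldl (fun s seq => PySem.Set.update s seq) PySem.Set.empty
      if PySem.Set.len vals ≠ (org.length : Int) || vals.any (fun v => !pos.contains v) then false
      else
        match seqs.foldl (fun st seq =>
            (seq.zip seq.tail).foldl (fun st p =>
              match st with
              | none => none
              | some cov =>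
                let pa := pos.getD p.1 0
                let pb := pos.getD p.2 0
                if pa ≥ pb then none
                else if pb == pa + 1 then some (cov.set pa.toNat true) else some cov) st)
            (some (List.replicate (org.length - 1) false)) with
        | none => false
        | some cov => cov.all (fun c => c)

-- ===== PRECONDITION & SPEC =====
def Spec_is_unique_sequence (org : List Int) (seqs : List (List Int)) (out : Bool) : Prop := out = is_unique_sequence_alt org seqs
instance (org : List Int) (seqs : List (List Int)) (out : Bool) : Decidable (Spec_is_unique_sequence org seqs out) := by unfold Spec_is_unique_sequence; infer_instance

-- ===== CLAIM (what is proved, stated in full; the proofs are below) =====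
def Claim_equal_is_unique_sequence : Prop := ∀ (org : List Int) (seqs : List (List Int)), Dom_is_unique_sequence org seqs → Spec_is_unique_sequence org seqs (is_unique_sequence org seqs)

-- ===== LEMMAS AND PROOFS =====

-- Abstract view of the data both programs work on.
def pvPairs (seqs : List (List Int)) : List (Int × Int) := seqs.flatMap (fun s => s.zip s.tail)
def pvV (seqs : List (List Int)) : PySem.Set Int := PySem.Set.ofList seqs.flatten
def pvPreds (ps : List (Int × Int)) (b : Int) : PySem.Set Int :=
  PySem.Set.ofList ((ps.filter (fun p => p.2 == b)).map Prod.fst)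
-- x is "ready" after the nodes of P have been emitted.
def pvReady (seqs : List (List Int)) (P : List Int) (x : Int) : Prop :=
  x ∈ pvV seqs ∧ x ∉ P ∧ ∀ p ∈ pvPairs seqs, p.2 = x → p.1 ∈ P
-- The common characterisation: org nodup, its values are exactly those of seqs, every
-- seq pair goes strictly forward in org, every adjacent org pair occurs in some seq.
def pvC (org : List Int) (seqs : List (List Int)) : Prop :=
  org.Nodup ∧ (∀ x, x ∈ pvV seqs ↔ x ∈ org) ∧
  (∀ p ∈ pvPairs seqs, p.1 ∈ org ∧ p.2 ∈ org ∧ org.idxOf p.1 < org.idxOf p.2) ∧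
  (∀ i : Nat, i + 1 < org.length → (org.getD i 0, org.getD (i + 1) 0) ∈ pvPairs seqs)
-- What a successful BFS of A means.
def pvR (org : List Int) (seqs : List (List Int)) : Prop :=
  (∀ p ∈ pvPairs seqs, p.1 ≠ p.2) ∧ (pvV seqs).length = org.length ∧ (∀ v ∈ org, v ∈ pvV seqs) ∧
  (∀ j : Nat, j < org.length → ∀ x, pvReady seqs (org.take j) x ↔ x = org.getD j 0) ∧
  (∀ x, ¬ pvReady seqs org x)

lemma pv_mem_preds (ps : List (Int × Int)) (a b : Int) :
    a ∈ pvPreds ps b ↔ (a, b) ∈ ps := by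
  simp only [pvPreds, PySem.Set.mem_ofList, List.mem_map, List.mem_filter]
  constructor
  · rintro ⟨⟨a', b'⟩, ⟨hp, h2⟩, rfl⟩
    simp only [beq_iff_eq] at h2
    subst h2; exact hp
  · intro h; exact ⟨(a, b), ⟨h, by simp⟩, rfl⟩

lemma pv_pair_mem_V (seqs : List (List Int)) (p : Int × Int) (hp : p ∈ pvPairs seqs) :
    p.1 ∈ pvV seqs ∧ p.2 ∈ pvV seqs := by
  simp only [pvPairs, List.mem_flatMap] at hp
  obtain ⟨s, hs, hz⟩ := hp
  obtain ⟨h1, h2⟩ := List.of_mem_zip (show (p.1, p.2) ∈ s.zip s.tail by simpa using hz)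
  have h2' : p.2 ∈ s := List.mem_of_mem_tail h2
  simp only [pvV, PySem.Set.mem_ofList, List.mem_flatten]
  exact ⟨⟨s, hs, h1⟩, ⟨s, hs, h2'⟩⟩

-- generic: a fold over nested zip-pairs is a fold over pvPairs
lemma pv_foldl_pairs {β : Type} (seqs : List (List Int)) (f : β → Int × Int → β) (init : β) :
    seqs.foldl (fun st s => (s.zip s.tail).foldl f st) init = (pvPairs seqs).foldl f init :=
  (List.foldl_flatMap).symm

-- A's `for i in range(len(seq)-1)` indexing loop is the fold over consecutive pairs
lemma pv_aux_range_pairs {β : Type} (l : List Int) (f : β → Int → Int → β) :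
    ∀ init : β, (List.range (l.length - 1)).foldl
        (fun st k => f st (l.getD k 0) (l.getD (k + 1) 0)) init
      = (l.zip l.tail).foldl (fun st p => f st p.1 p.2) init := by
  induction l with
  | nil => intro init; rfl
  | cons a t ih =>
    intro init
    simp only [List.length_cons, Nat.add_sub_cancel]
    cases t with
    | nil => rfl
    | cons b t' =>
      rw [show (b :: t').length = t'.length + 1 from rfl, List.range_succ_eq_map]
      simp only [List.foldl_cons, List.foldl_map]
      have hf : (fun (st : β) (k : Nat) => f st ((a :: b :: t').getD (k.succ) 0) ((a :: b :: t').getD (k.succ + 1) 0))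
          = (fun st k => f st ((b :: t').getD k 0) ((b :: t').getD (k + 1) 0)) := by
        funext st k
        simp
      rw [hf]
      rw [show f init ((a :: b :: t').getD 0 0) ((a :: b :: t').getD (0 + 1) 0) = f init a b from rfl]
      have := ih (f init a b)
      simp only [List.length_cons, Nat.add_sub_cancel] at this
      rw [this]
      simp

lemma pv_foldl_range_pairs {β : Type} (seq : List Int) (f : β → Int → Int → β) (init : β) :
    (PySem.List.pyRange 0 ((seq.length : Int) - 1)).foldl
        (fun st i => f st (PySem.List.pyGetD seq i 0) (PySem.List.pyGetD seq (i + 1) 0)) init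
      = (seq.zip seq.tail).foldl (fun st p => f st p.1 p.2) init := by
  rcases seq with _ | ⟨a, t⟩
  · rfl
  · have hb : (((a :: t).length : Nat) : Int) - 1 = (((a :: t).length - 1 : Nat) : Int) := by
      simp only [List.length_cons]; push_cast; omega
    rw [hb, PySem.List.pyRange_zero_natCast, List.foldl_map]
    have hf : (fun (st : β) (k : Nat) => f st (PySem.List.pyGetD (a :: t) (↑k) 0) (PySem.List.pyGetD (a :: t) ((↑k : Int) + 1) 0))
        = (fun st k => f st ((a :: t).getD k 0) ((a :: t).getD (k + 1) 0)) := by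
      funext st k
      rw [show ((k : Int) + 1) = (((k + 1 : Nat)) : Int) by push_cast; ring]
      rw [PySem.List.pyGetD_natCast, PySem.List.pyGetD_natCast]
    rw [hf, pv_aux_range_pairs]


def pvFoldPairs (ps : List (Int × Int)) (gd : PySem.Dict Int (PySem.Set Int) × PySem.Dict Int Int) :
    Option (PySem.Dict Int (PySem.Set Int) × PySem.Dict Int Int) :=
  ps.foldl (fun st p => pvStepPairA st p.1 p.2) (some gd)

lemma pv_foldPairs_none_propagate (ps : List (Int × Int)) :
    ps.foldl (fun st p => pvStepPairA st p.1 p.2) none = none := by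
  induction ps with
  | nil => rfl
  | cons p t ih => simpa [pvStepPairA] using ih

lemma pv_buildStep_none (seqs : List (List Int)) :
    seqs.foldl pvBuildStepA none = none := by
  induction seqs with
  | nil => rfl
  | cons s t ih => simpa [pvBuildStepA] using ih

lemma pv_buildA_from : ∀ (seqs : List (List Int)) (g : PySem.Dict Int (PySem.Set Int))
    (d : PySem.Dict Int Int) (v : PySem.Set Int),
    seqs.foldl pvBuildStepA (some (g, d, v))
    = (pvFoldPairs (pvPairs seqs) (g, d)).map
        (fun gd => (gd.1, gd.2, PySem.Set.update v seqs.flatten)) := by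
  intro seqs
  induction seqs with
  | nil => intro g d v; rfl
  | cons s t ih =>
    intro g d v
    rw [List.foldl_cons]
    have hin := pv_foldl_range_pairs s (fun st a b => pvStepPairA st a b) (some (g, d))
    simp only [pvBuildStepA]
    rw [hin]
    have hpairs : pvPairs (s :: t) = s.zip s.tail ++ pvPairs t := by
      simp [pvPairs]
    have hflat : PySem.Set.update v (s :: t).flatten
        = PySem.Set.update (PySem.Set.update v s) t.flatten := by
      simp [PySem.Set.update, List.foldl_append]
    rcases hz : (s.zip s.tail).foldl (fun st p => pvStepPairA st p.1 p.2) (some (g, d)) with _ | ⟨g', d'⟩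
    · rw [hz]
      simp only [Option.map_none]
      rw [pv_buildStep_none]
      unfold pvFoldPairs
      rw [hpairs, List.foldl_append]
      have : (s.zip s.tail).foldl (fun st p => pvStepPairA st p.1 p.2) (some (g, d)) = none := hz
      rw [this, pv_foldPairs_none_propagate]
      rfl
    · rw [hz]
      simp only [Option.map_some]
      rw [ih g' d' (PySem.Set.update v s)]
      unfold pvFoldPairs
      rw [hpairs, List.foldl_append, hz, hflat]

lemma pv_buildA_eq (seqs : List (List Int)) :
    pvBuildA seqs = (pvFoldPairs (pvPairs seqs) (PySem.Dict.empty, PySem.Dict.empty)).map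
      (fun gd => (gd.1, gd.2, pvV seqs)) := by
  rw [pvBuildA, pv_buildA_from]
  rfl

lemma pv_stepPair_some (g : PySem.Dict Int (PySem.Set Int)) (d : PySem.Dict Int Int)
    (a b : Int) (hab : a ≠ b) :
    ∃ g' d', pvStepPairA (some (g, d)) a b = some (g', d') := by
  simp only [pvStepPairA, if_neg hab]
  split <;> exact ⟨_, _, rfl⟩

lemma pv_foldPairs_none_iff (ps : List (Int × Int)) :
    ∀ gd, pvFoldPairs ps gd = none ↔ ∃ p ∈ ps, p.1 = p.2 := by
  induction ps with
  | nil => intro gd; simp [pvFoldPairs]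
  | cons p t ih =>
    intro ⟨g, d⟩
    unfold pvFoldPairs
    rw [List.foldl_cons]
    by_cases hab : p.1 = p.2
    · have hstep : pvStepPairA (some (g, d)) p.1 p.2 = none := by
        simp [pvStepPairA, hab]
      rw [hstep, pv_foldPairs_none_propagate]
      simp only [true_iff]
      exact ⟨p, List.mem_cons_self .., hab⟩
    · obtain ⟨g', d', hstep⟩ := pv_stepPair_some g d p.1 p.2 hab
      rw [hstep]
      rw [show (t.foldl (fun st p => pvStepPairA st p.1 p.2) (some (g', d'))) = pvFoldPairs t (g', d') from rfl]
      rw [ih (g', d')]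
      simp only [List.mem_cons]
      constructor
      · rintro ⟨q, hq, h⟩; exact ⟨q, Or.inr hq, h⟩
      · rintro ⟨q, hq | hq, h⟩
        · exact absurd (hq ▸ h) hab
        · exact ⟨q, hq, h⟩

-- invariant of the build loop
def pvGD (done : List (Int × Int)) (g : PySem.Dict Int (PySem.Set Int)) (d : PySem.Dict Int Int) : Prop :=
  (∀ a : Int, (g.getD a PySem.Set.empty).Nodup) ∧
  (∀ a b : Int, b ∈ g.getD a PySem.Set.empty ↔ (a, b) ∈ done) ∧
  (∀ b : Int, d.getD b 0 = ((pvPreds done b).length : Int))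

lemma pv_ofList_append_singleton {α : Type} [BEq α] (l : List α) (a : α) :
    PySem.Set.ofList (l ++ [a]) = PySem.Set.add (PySem.Set.ofList l) a := by
  rw [PySem.Set.ofList_eq_foldl, PySem.Set.ofList_eq_foldl, List.foldl_append]
  rfl

lemma pv_add_of_mem {α : Type} [BEq α] [LawfulBEq α] (s : PySem.Set α) (a : α) (h : a ∈ s) :
    PySem.Set.add s a = s := by
  simp [PySem.Set.add, PySem.Set.contains, h]

lemma pv_add_of_not_mem {α : Type} [BEq α] [LawfulBEq α] (s : PySem.Set α) (a : α) (h : a ∉ s) :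
    PySem.Set.add s a = s ++ [a] := by
  simp [PySem.Set.add, PySem.Set.contains, h]

lemma pv_nodup_add {α : Type} [BEq α] [LawfulBEq α] (s : PySem.Set α) (a : α) (h : s.Nodup) :
    (PySem.Set.add s a).Nodup := by
  by_cases hm : a ∈ s
  · rw [pv_add_of_mem s a hm]; exact h
  · rw [pv_add_of_not_mem s a hm]
    rw [List.nodup_append]
    refine ⟨h, List.nodup_singleton a, ?_⟩
    intro x hx y hy
    simp only [List.mem_singleton] at hy
    subst hy
    intro hxy
    exact hm (hxy ▸ hx)

lemma pv_preds_append_pair (done : List (Int × Int)) (a b b' : Int) :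
    pvPreds (done ++ [(a, b)]) b'
      = if b' = b then PySem.Set.add (pvPreds done b') a else pvPreds done b' := by
  unfold pvPreds
  rw [List.filter_append, List.map_append]
  by_cases hb : b' = b
  · subst hb
    rw [show List.filter (fun p => p.2 == b') [(a, b')] = [(a, b')] by simp]
    simp only [List.map_cons, List.map_nil]
    exact pv_ofList_append_singleton _ a
  · rw [show List.filter (fun p => p.2 == b') [(a, b)] = [] by simp [Ne.symm hb]]
    simp [hb]

lemma pv_GD_step (done : List (Int × Int)) (g : PySem.Dict Int (PySem.Set Int))
    (d : PySem.Dict Int Int) (a b : Int) (hab : a ≠ b) (hgd : pvGD done g d) :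
    ∃ g' d', pvStepPairA (some (g, d)) a b = some (g', d') ∧ pvGD (done ++ [(a, b)]) g' d' := by
  obtain ⟨hn, hg, hd⟩ := hgd
  simp only [pvStepPairA, if_neg hab]
  by_cases hc : b ∈ g.getD a PySem.Set.empty
  · rw [if_pos (by simpa [PySem.Set.contains] using hc)]
    refine ⟨g, d, rfl, hn, ?_, ?_⟩
    · intro a' b'
      rw [hg a' b', List.mem_append]
      constructor
      · exact Or.inl
      · rintro (h | h)
        · exact h
        · simp only [List.mem_singleton, Prod.mk.injEq] at h
          obtain ⟨rfl, rfl⟩ := h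
          exact (hg a' b').mp hc
    · intro b'
      rw [hd b', pv_preds_append_pair]
      split
      · next hb =>
        subst hb
        rw [pv_add_of_mem _ a ((pv_mem_preds done a b').mpr ((hg a b').mp hc))]
      · rfl
  · rw [if_neg (by simpa [PySem.Set.contains] using hc)]
    refine ⟨_, _, rfl, ?_, ?_, ?_⟩
    · intro a'
      rw [PySem.Dict.getD_insert]
      split
      · exact pv_nodup_add _ b (hn a)
      · exact hn a'
    · intro a' b'
      rw [PySem.Dict.getD_insert]
      split
      · next ha =>
        subst ha
        rw [PySem.Set.mem_add, hg a' b', List.mem_append]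
        constructor
        · rintro (h | rfl)
          · exact Or.inl h
          · exact Or.inr (by simp)
        · rintro (h | h)
          · exact Or.inl h
          · simp only [List.mem_singleton, Prod.mk.injEq] at h
            exact Or.inr h.2
      · next ha =>
        rw [hg a' b', List.mem_append]
        constructor
        · exact Or.inl
        · rintro (h | h)
          · exact h
          · simp only [List.mem_singleton, Prod.mk.injEq] at h
            exact absurd h.1 ha
    · intro b'
      rw [PySem.Dict.getD_modify, pv_preds_append_pair]
      split
      · next hb =>
        subst hb
        have hna : a ∉ pvPreds done b' := fun hm =>
          hc ((hg a b').mpr ((pv_mem_preds done a b').mp hm))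
        rw [pv_add_of_not_mem _ a hna, hd b']
        simp
      · exact hd b'

lemma pv_foldPairs_spec (ps : List (Int × Int)) :
    ∀ done g d, (∀ p ∈ ps, p.1 ≠ p.2) → pvGD done g d →
    ∃ g' d', pvFoldPairs ps (g, d) = some (g', d') ∧ pvGD (done ++ ps) g' d' := by
  induction ps with
  | nil =>
    intro done g d _ hgd
    exact ⟨g, d, rfl, by simpa using hgd⟩
  | cons p t ih =>
    intro done g d hns hgd
    obtain ⟨g1, d1, hstep, hgd1⟩ :=
      pv_GD_step done g d p.1 p.2 (hns p (List.mem_cons_self ..)) hgd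
    obtain ⟨g', d', hfold, hgd'⟩ :=
      ih (done ++ [p]) g1 d1 (fun q hq => hns q (List.mem_cons_of_mem _ hq)) hgd1
    refine ⟨g', d', ?_, ?_⟩
    · unfold pvFoldPairs at hfold ⊢
      rw [List.foldl_cons, hstep]
      exact hfold
    · simpa using hgd'

-- the decrement-and-collect loop of one BFS step
lemma pv_dec_loop (nbrs : List Int) :
    ∀ (d : PySem.Dict Int Int) (acc : List Int), nbrs.Nodup →
    (nbrs.foldl (fun (st : PySem.Dict Int Int × List Int) nb =>
        let d' := st.1.insert nb (st.1.getD nb 0 - 1)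
        if d'.getD nb 0 == 0 then (d', st.2 ++ [nb]) else (d', st.2)) (d, acc))
      = (nbrs.foldl (fun d' nb => d'.insert nb (d'.getD nb 0 - 1)) d,
         acc ++ nbrs.filter (fun nb => d.getD nb 0 - 1 == 0)) := by
  induction nbrs with
  | nil => intro d acc _; simp
  | cons nb rest ih =>
    intro d acc hnd
    have hnb : nb ∉ rest := (List.nodup_cons.mp hnd).1
    have hrest : rest.Nodup := (List.nodup_cons.mp hnd).2
    rw [List.foldl_cons, List.foldl_cons]
    have hself : (d.insert nb (d.getD nb 0 - 1)).getD nb 0 = d.getD nb 0 - 1 :=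
      PySem.Dict.getD_insert_self ..
    have hfc : rest.filter (fun x => (d.insert nb (d.getD nb 0 - 1)).getD x 0 - 1 == 0)
        = rest.filter (fun x => d.getD x 0 - 1 == 0) := by
      apply List.filter_congr
      intro x hx
      rw [PySem.Dict.getD_insert_of_ne _ _ _ (by rintro rfl; exact hnb hx)]
    simp only [hself]
    by_cases h0 : d.getD nb 0 - 1 = 0
    · rw [if_pos (by simpa using h0)]
      rw [ih _ _ hrest, hfc]
      simp [h0]
    · rw [if_neg (by simpa using h0)]
      rw [ih _ _ hrest, hfc]
      simp [h0]

lemma pv_dec_getD (nbrs : List Int) :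
    ∀ (d : PySem.Dict Int Int) (b : Int), nbrs.Nodup →
    (nbrs.foldl (fun d' nb => d'.insert nb (d'.getD nb 0 - 1)) d).getD b 0
      = if b ∈ nbrs then d.getD b 0 - 1 else d.getD b 0 := by
  induction nbrs with
  | nil => intro d b _; simp
  | cons nb rest ih =>
    intro d b hnd
    have hnb : nb ∉ rest := (List.nodup_cons.mp hnd).1
    rw [List.foldl_cons, ih _ b (List.nodup_cons.mp hnd).2]
    by_cases hb : b = nb
    · subst hb
      rw [if_neg hnb, PySem.Dict.getD_insert_self, if_pos (List.mem_cons_self ..)]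
    · rw [PySem.Dict.getD_insert_of_ne _ _ _ hb]
      by_cases hbr : b ∈ rest
      · rw [if_pos hbr, if_pos (List.mem_cons_of_mem _ hbr)]
      · rw [if_neg hbr, if_neg (by simp [hb, hbr])]

lemma pv_len_one_mem {α : Type} {F : List α} (hF : F.length = 1) {a b : α}
    (ha : a ∈ F) (hb : b ∈ F) : a = b := by
  obtain ⟨c, rfl⟩ := List.length_eq_one_iff.mp hF
  simp only [List.mem_singleton] at ha hb
  rw [ha, hb]

lemma pv_nodup_all_eq_len {α : Type} (F : List α) (hnd : F.Nodup) (c : α)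
    (hc : c ∈ F) (hall : ∀ q ∈ F, q = c) : F.length = 1 := by
  rcases F with _ | ⟨f, t⟩
  · simp at hc
  · have hf : f = c := hall f (by simp)
    rcases t with _ | ⟨u, tu⟩
    · rfl
    · have hu : u = c := hall u (by simp)
      exact absurd (by simp [hf, hu] : f ∈ u :: tu) (List.nodup_cons.mp hnd).1

lemma pv_nodup_preds (ps : List (Int × Int)) (b : Int) : (pvPreds ps b).Nodup :=
  PySem.Set.nodup_ofList _

lemma pv_filter_append_one (l P : List Int) (c : Int) :
    l.filter (fun a => !decide (a ∈ P ++ [c]))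
      = (l.filter (fun a => !decide (a ∈ P))).filter (fun a => !decide (a = c)) := by
  rw [List.filter_filter]
  apply List.filter_congr
  intro a _
  by_cases h1 : a ∈ P <;> by_cases h2 : a = c <;> simp [h1, h2]

lemma pv_length_filter_ne (F : List Int) (c : Int) (hnd : F.Nodup) (hc : c ∈ F) :
    (F.filter (fun a => !decide (a = c))).length = F.length - 1 := by
  have he : F.erase c = F.filter (fun a => !decide (a = c)) := by
    rw [List.Nodup.erase_eq_filter hnd]
    apply List.filter_congr
    intro a _
    by_cases h : a = c <;> simp [h]
  rw [← he, List.length_erase_of_mem hc]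

-- the BFS invariant lemma
lemma pv_bfs_spec (org : List Int) (seqs : List (List Int))
    (graph : PySem.Dict Int (PySem.Set Int))
    (hgn : ∀ a : Int, (graph.getD a PySem.Set.empty).Nodup)
    (hg : ∀ a b : Int, b ∈ graph.getD a PySem.Set.empty ↔ (a, b) ∈ pvPairs seqs)
    (hns : ∀ p ∈ pvPairs seqs, p.1 ≠ p.2) :
    ∀ (fuel i : Nat) (queue : List Int) (indeg : PySem.Dict Int Int),
    i ≤ org.length → org.length - i < fuel →
    (org.take i).Nodup →
    (∀ p ∈ pvPairs seqs, p.2 ∈ org.take i → p.1 ∈ org.take i) →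
    queue.Nodup →
    (∀ x, x ∈ queue ↔ pvReady seqs (org.take i) x) →
    (∀ b, indeg.getD b 0 = (((pvPreds (pvPairs seqs) b).filter (fun a => !decide (a ∈ org.take i))).length : Int)) →
    (pvBFSA graph org fuel queue indeg i = true ↔
      ((∀ j : Nat, i ≤ j → j < org.length →
          ∀ x, pvReady seqs (org.take j) x ↔ x = org.getD j 0) ∧
        (∀ x, ¬ pvReady seqs org x))) := by
  intro fuel
  induction fuel with
  | zero => intro i queue indeg hi hfuel; omega
  | succ fuel ih =>
    intro i queue indeg hi hfuel htn htc hqn hq hd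
    rcases queue with _ | ⟨curr, rest⟩
    · -- empty queue: the loop exits and A returns index == len(org)
      rw [show pvBFSA graph org (fuel + 1) [] indeg i = (i == org.length) from rfl]
      by_cases hin : i = org.length
      · subst hin
        simp only [beq_self_eq_true, true_iff]
        refine ⟨fun j hj1 hj2 => absurd (lt_of_le_of_lt hj1 hj2) (lt_irrefl _), fun x hx => ?_⟩
        have := (hq x).mpr (by rwa [List.take_length])
        simp at this
      · simp only [beq_iff_eq, hin, false_iff, not_and_or]
        left
        intro h1
        have hr : pvReady seqs (org.take i) (org.getD i 0) :=
          (h1 i le_rfl (by omega) _).mpr rfl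
        have := (hq _).mpr hr
        simp at this
    · rcases rest with _ | ⟨r, rest'⟩
      · -- queue = [curr]
        by_cases hstop : i = org.length ∨ curr ≠ org.getD i 0
        · have hLHS : pvBFSA graph org (fuel + 1) [curr] indeg i = false := by
            simp only [pvBFSA]
            rw [if_neg (by simp), if_pos hstop]
          rw [hLHS]
          simp only [Bool.false_eq_true, false_iff, not_and_or]
          rcases hstop with hin | hne
          · subst hin
            right
            intro h2
            have := (hq curr).mp (List.mem_singleton_self curr)
            rw [List.take_length] at this
            exact h2 curr this
          · by_cases hin : i = org.length
            · subst hin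
              right
              intro h2
              have := (hq curr).mp (List.mem_singleton_self curr)
              rw [List.take_length] at this
              exact h2 curr this
            · left
              intro h1
              exact hne ((h1 i le_rfl (by omega) curr).mp ((hq curr).mp (List.mem_singleton_self curr)))
        · push Not at hstop
          obtain ⟨hin, hcq⟩ := hstop
          have hilt : i < org.length := by omega
          -- the successful step: pop curr = org[i], decrement its neighbours
          have hcurr : pvReady seqs (org.take i) curr := (hq curr).mp (List.mem_singleton_self curr)
          have hP' : org.take (i + 1) = org.take i ++ [curr] := by
            rw [List.take_add_one, List.getElem?_eq_getElem hilt]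
            rw [show org[i] = org.getD i 0 from (List.getD_eq_getElem _ _ hilt).symm, ← hcq]
            rfl
          have hnbn : (graph.getD curr PySem.Set.empty).Nodup := hgn curr
          have hdec := pv_dec_loop (graph.getD curr PySem.Set.empty) indeg [] hnbn
          have hLHS : pvBFSA graph org (fuel + 1) [curr] indeg i
              = pvBFSA graph org fuel
                  ((graph.getD curr PySem.Set.empty).filter (fun nb => indeg.getD nb 0 - 1 == 0))
                  ((graph.getD curr PySem.Set.empty).foldl (fun d' nb => d'.insert nb (d'.getD nb 0 - 1)) indeg)
                  (i + 1) := by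
            simp only [pvBFSA]
            rw [if_neg (by simp), if_neg (by push Not; exact ⟨hin, hcq⟩), hdec]
            simp
          rw [hLHS]
          -- invariants at i+1
          have hnotP : curr ∉ org.take i := hcurr.2.1
          have htn' : (org.take (i + 1)).Nodup := by
            rw [hP', List.nodup_append]
            refine ⟨htn, List.nodup_singleton curr, ?_⟩
            intro x hx y hy
            simp only [List.mem_singleton] at hy
            subst hy
            intro hxy
            exact hnotP (hxy ▸ hx)
          have htc' : ∀ p ∈ pvPairs seqs, p.2 ∈ org.take (i + 1) → p.1 ∈ org.take (i + 1) := by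
            intro p hp hp2
            rw [hP', List.mem_append] at hp2 ⊢
            rcases hp2 with h | h
            · exact Or.inl (htc p hp h)
            · simp only [List.mem_singleton] at h
              exact Or.inl (hcurr.2.2 p hp h)
          have hqn' := List.Nodup.filter (fun nb => indeg.getD nb 0 - 1 == 0) hnbn
          have hq' : ∀ x, x ∈ (graph.getD curr PySem.Set.empty).filter (fun nb => indeg.getD nb 0 - 1 == 0)
              ↔ pvReady seqs (org.take (i + 1)) x := by
            intro x
            rw [List.mem_filter]
            constructor
            · rintro ⟨hxn, hx0⟩
              have hpair : (curr, x) ∈ pvPairs seqs := (hg curr x).mp hxn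
              have hxcount : ((pvPreds (pvPairs seqs) x).filter
                  (fun a => !decide (a ∈ org.take i))).length = 1 := by
                rw [hd x] at hx0
                simp only [beq_iff_eq] at hx0
                omega
              have hcin : curr ∈ (pvPreds (pvPairs seqs) x).filter
                  (fun a => !decide (a ∈ org.take i)) := by
                rw [List.mem_filter]
                exact ⟨(pv_mem_preds _ _ _).mpr hpair, by simp [hnotP]⟩
              refine ⟨(pv_pair_mem_V seqs (curr, x) hpair).2, ?_, ?_⟩
              · rw [hP', List.mem_append]
                rintro (h | h)
                · exact hnotP (htc (curr, x) hpair h)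
                · simp only [List.mem_singleton] at h
                  exact hns (curr, x) hpair h.symm
              · intro p hp hp2
                have hq1 : p.1 ∈ pvPreds (pvPairs seqs) x := by
                  rw [pv_mem_preds]
                  rcases p with ⟨pa, pb⟩
                  cases hp2
                  exact hp
                rw [hP', List.mem_append]
                by_cases hmem : p.1 ∈ org.take i
                · exact Or.inl hmem
                · have hin2 : p.1 ∈ (pvPreds (pvPairs seqs) x).filter
                      (fun a => !decide (a ∈ org.take i)) := by
                    rw [List.mem_filter]
                    exact ⟨hq1, by simp [hmem]⟩
                  have := pv_len_one_mem hxcount hin2 hcin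
                  right
                  simp [this]
            · rintro ⟨hxV, hxP', hxpreds⟩
              have hxc : x ≠ curr := fun h => hxP' (by rw [hP', h]; simp)
              have hxP : x ∉ org.take i := fun h => hxP' (by rw [hP']; exact List.mem_append_left _ h)
              have hex : ∃ p ∈ pvPairs seqs, p.2 = x ∧ p.1 ∉ org.take i := by
                by_contra hno
                push Not at hno
                have hr : pvReady seqs (org.take i) x :=
                  ⟨hxV, hxP, fun p hp h2 => hno p hp h2⟩
                exact hxc (by simpa using (hq x).mpr hr)
              obtain ⟨p, hp, hp2, hp1⟩ := hex
              have hp1' : p.1 ∈ org.take (i + 1) := hxpreds p hp hp2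
              rw [hP', List.mem_append] at hp1'
              have hpc : p.1 = curr := by
                rcases hp1' with h | h
                · exact absurd h hp1
                · simpa using h
              have hpair : (curr, x) ∈ pvPairs seqs := by
                rcases p with ⟨pa, pb⟩
                cases hp2
                cases hpc
                exact hp
              have hcin : curr ∈ (pvPreds (pvPairs seqs) x).filter
                  (fun a => !decide (a ∈ org.take i)) := by
                rw [List.mem_filter]
                exact ⟨(pv_mem_preds _ _ _).mpr hpair, by simp [hnotP]⟩
              have hall : ∀ q ∈ (pvPreds (pvPairs seqs) x).filter
                  (fun a => !decide (a ∈ org.take i)), q = curr := by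
                intro q hqmem
                rw [List.mem_filter] at hqmem
                obtain ⟨hq1, hq2⟩ := hqmem
                simp only [Bool.not_eq_eq_eq_not, Bool.not_true, decide_eq_false_iff_not] at hq2
                have hqpair : (q, x) ∈ pvPairs seqs := (pv_mem_preds _ _ _).mp hq1
                have := hxpreds (q, x) hqpair rfl
                rw [hP', List.mem_append] at this
                rcases this with h | h
                · exact absurd h hq2
                · simpa using h
              have hcount := pv_nodup_all_eq_len _
                (List.Nodup.filter _ (pv_nodup_preds (pvPairs seqs) x)) curr hcin hall
              refine ⟨(hg curr x).mpr hpair, ?_⟩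
              rw [hd x, hcount]
              simp
          have hd' : ∀ b, ((graph.getD curr PySem.Set.empty).foldl (fun d' nb => d'.insert nb (d'.getD nb 0 - 1)) indeg).getD b 0
              = (((pvPreds (pvPairs seqs) b).filter (fun a => !decide (a ∈ org.take (i + 1)))).length : Int) := by
            intro b
            rw [pv_dec_getD _ indeg b hnbn, hP', pv_filter_append_one]
            by_cases hb : b ∈ graph.getD curr PySem.Set.empty
            · rw [if_pos hb, hd b]
              have hpair : (curr, b) ∈ pvPairs seqs := (hg curr b).mp hb
              have hcF : curr ∈ (pvPreds (pvPairs seqs) b).filter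
                  (fun a => !decide (a ∈ org.take i)) := by
                rw [List.mem_filter]
                exact ⟨(pv_mem_preds _ _ _).mpr hpair, by simp [hnotP]⟩
              rw [pv_length_filter_ne _ curr
                (List.Nodup.filter _ (pv_nodup_preds (pvPairs seqs) b)) hcF]
              have h1 : 1 ≤ ((pvPreds (pvPairs seqs) b).filter
                  (fun a => !decide (a ∈ org.take i))).length :=
                List.length_pos_of_mem hcF
              omega
            · rw [if_neg hb, hd b]
              congr 1
              have : ∀ a ∈ (pvPreds (pvPairs seqs) b).filter
                  (fun a => !decide (a ∈ org.take i)), (!decide (a = curr)) = true := by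
                intro a ha
                rw [List.mem_filter] at ha
                simp only [Bool.not_eq_eq_eq_not, Bool.not_true, decide_eq_false_iff_not]
                intro hac
                subst hac
                exact hb ((hg a b).mpr ((pv_mem_preds _ _ _).mp ha.1))
              rw [List.filter_eq_self.mpr this]
          rw [ih (i + 1) _ _ (by omega) (by omega) htn' htc' hqn' hq' hd']
          -- RHS(i) ↔ RHS(i+1): position i is already certified by the queue
          have hspec_i : ∀ x, pvReady seqs (org.take i) x ↔ x = org.getD i 0 := by
            intro x
            rw [← hq x]
            simp [hcq]
          constructor
          · rintro ⟨h1, h2⟩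
            refine ⟨fun j hj1 hj2 => ?_, h2⟩
            rcases Nat.eq_or_lt_of_le hj1 with h | h
            · subst h; exact hspec_i
            · exact h1 j (by omega) hj2
          · rintro ⟨h1, h2⟩
            exact ⟨fun j hj1 hj2 => h1 j (by omega) hj2, h2⟩
      · -- queue has at least two elements: A returns False
        have hLHS : pvBFSA graph org (fuel + 1) (curr :: r :: rest') indeg i = false := by
          simp only [pvBFSA]
          rw [if_pos (by simp)]
        rw [hLHS]
        simp only [Bool.false_eq_true, false_iff, not_and_or]
        have hmc := (hq curr).mp (by simp)
        have hmr := (hq r).mp (by simp)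
        have hcr : curr ≠ r := by
          intro h
          subst h
          exact (List.nodup_cons.mp hqn).1 (by simp)
        by_cases hin : i = org.length
        · subst hin
          right
          intro h2
          rw [List.take_length] at hmc
          exact h2 curr hmc
        · left
          intro h1
          have h := h1 i le_rfl (by omega)
          exact hcr (((h curr).mp hmc).trans ((h r).mp hmr).symm)

lemma pv_GD_init : pvGD [] PySem.Dict.empty PySem.Dict.empty := by
  refine ⟨fun a => ?_, fun a b => ?_, fun b => ?_⟩
  · rw [PySem.Dict.getD_empty]
    exact List.nodup_nil
  · rw [PySem.Dict.getD_empty]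
    simp [PySem.Set.empty]
  · rw [PySem.Dict.getD_empty]
    simp [pvPreds, PySem.Set.ofList]

lemma pv_A_char (org : List Int) (seqs : List (List Int)) (hs : seqs ≠ []) :
    is_unique_sequence org seqs = true ↔ pvR org seqs := by
  rw [is_unique_sequence, if_neg (by simpa [List.isEmpty_iff] using hs), pv_buildA_eq]
  by_cases hsl : ∃ p ∈ pvPairs seqs, p.1 = p.2
  · rw [(pv_foldPairs_none_iff (pvPairs seqs) _).mpr hsl]
    simp only [Option.map_none, Bool.false_eq_true, false_iff]
    rintro ⟨hns, -⟩
    obtain ⟨p, hp, hpeq⟩ := hsl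
    exact hns p hp hpeq
  · have hns : ∀ p ∈ pvPairs seqs, p.1 ≠ p.2 := by
      intro p hp h
      exact hsl ⟨p, hp, h⟩
    obtain ⟨g, d, hfold, hgd⟩ := pv_foldPairs_spec (pvPairs seqs) [] _ _ hns pv_GD_init
    simp only [List.nil_append] at hgd
    obtain ⟨hgn, hg, hd⟩ := hgd
    rw [hfold]
    simp only [Option.map_some]
    by_cases hlen : (pvV seqs).length = org.length
    · rw [if_neg (by simp [PySem.Set.len, hlen])]
      by_cases hsub : ∀ v ∈ org, v ∈ pvV seqs
      · rw [if_neg (by simpa [PySem.Set.contains] using hsub)]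
        have hdfilter : ∀ b, d.getD b 0
            = (((pvPreds (pvPairs seqs) b).filter (fun a => !decide (a ∈ org.take 0))).length : Int) := by
          intro b
          rw [hd b]
          congr 1
          rw [List.filter_eq_self.mpr (by intro a _; simp)]
        have hq0 : ∀ x, x ∈ (pvV seqs).filter (fun x => d.getD x 0 == 0)
            ↔ pvReady seqs (org.take 0) x := by
          intro x
          rw [List.mem_filter]
          simp only [List.take_zero]
          constructor
          · rintro ⟨hxv, hx0⟩
            rw [hd x] at hx0
            simp only [beq_iff_eq, Int.natCast_eq_zero, List.length_eq_zero_iff] at hx0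
            refine ⟨hxv, by simp, fun p hp hp2 => ?_⟩
            have : p.1 ∈ pvPreds (pvPairs seqs) x := by
              rw [pv_mem_preds]
              rcases p with ⟨pa, pb⟩
              cases hp2
              exact hp
            rw [hx0] at this
            simp at this
          · rintro ⟨hxv, -, hpreds⟩
            refine ⟨hxv, ?_⟩
            rw [hd x]
            simp only [beq_iff_eq, Int.natCast_eq_zero, List.length_eq_zero_iff]
            rcases he : pvPreds (pvPairs seqs) x with _ | ⟨q, qs⟩
            · rfl
            · have hqm : q ∈ pvPreds (pvPairs seqs) x := by rw [he]; simp
              have := hpreds (q, x) ((pv_mem_preds _ _ _).mp hqm) rfl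
              simp at this
        have hbfs := pv_bfs_spec org seqs g hgn hg hns (org.length + 1) 0
          ((pvV seqs).filter (fun x => d.getD x 0 == 0)) d
          (Nat.zero_le _) (by omega) (by simp) (by simp)
          (List.Nodup.filter _ (PySem.Set.nodup_ofList _)) hq0 hdfilter
        rw [hbfs]
        unfold pvR
        constructor
        · rintro ⟨h1, h2⟩
          exact ⟨hns, hlen, hsub, fun j hj => h1 j (Nat.zero_le _) hj, h2⟩
        · rintro ⟨-, -, -, h1, h2⟩
          exact ⟨fun j _ hj => h1 j hj, h2⟩
      · rw [if_pos (by simpa [PySem.Set.contains] using hsub)]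
        simp only [Bool.false_eq_true, false_iff]
        rintro ⟨-, -, h, -⟩
        exact hsub h
    · rw [if_pos (by simp [PySem.Set.len, hlen])]
      simp only [Bool.false_eq_true, false_iff]
      rintro ⟨-, h, -⟩
      exact hlen h

lemma pv_mem_take_iff (l : List Int) : ∀ (i : Nat) (x : Int), x ∈ l.take i ↔ x ∈ l ∧ l.idxOf x < i := by
  induction l with
  | nil => intro i x; simp
  | cons a t ih =>
    intro i x
    cases i with
    | zero => simp
    | succ i =>
      rw [List.take_succ_cons]
      by_cases hx : x = a
      · subst hx
        simp [List.idxOf_cons_self]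
      · simp only [List.mem_cons, hx, false_or, List.idxOf_cons_ne _ (fun h => hx h.symm)]
        rw [ih i x]
        constructor <;> rintro ⟨h1, h2⟩ <;> exact ⟨h1, by omega⟩

lemma pv_R_iff_C (org : List Int) (seqs : List (List Int)) :
    pvR org seqs ↔ pvC org seqs := by
  constructor
  · rintro ⟨hns, hlen, hsub, h1, h2⟩
    -- org is nodup: org[j] is never ready before position j is reached
    have hnd : org.Nodup := by
      rw [List.nodup_iff_injective_getElem]
      rintro ⟨i, hi⟩ ⟨j, hj⟩ hij
      simp only at hij
      by_contra hne
      have hne' : i ≠ j := fun h => hne (Fin.ext h)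
      rcases Nat.lt_or_ge i j with hlt | hge
      · have hready : pvReady seqs (org.take j) org[j] :=
          (h1 j hj org[j]).mpr (List.getD_eq_getElem _ _ hj).symm
        have hmem : org[j] ∈ org.take j := by
          rw [← hij]
          have : (org.take j)[i]'(by simpa [Nat.lt_min] using ⟨hlt, hi⟩) = org[i] := List.getElem_take
          rw [← this]
          exact List.getElem_mem _
        exact hready.2.1 hmem
      · have hlt : j < i := by omega
        clear hge
        have hready : pvReady seqs (org.take i) org[i] :=
          (h1 i hi org[i]).mpr (List.getD_eq_getElem _ _ hi).symm
        have hmem : org[i] ∈ org.take i := by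
          rw [hij]
          have : (org.take i)[j]'(by simpa [Nat.lt_min] using ⟨hlt, hj⟩) = org[j] := List.getElem_take
          rw [← this]
          exact List.getElem_mem _
        exact hready.2.1 hmem
    have hperm : org.Perm (pvV seqs) := by
      have hsp : org.Subperm (pvV seqs) := List.subperm_of_subset hnd hsub
      exact hsp.perm_of_length_le (by omega)
    have hVmem : ∀ x, x ∈ pvV seqs ↔ x ∈ org := fun x => (hperm.mem_iff (a := x)).symm
    have hfw : ∀ p ∈ pvPairs seqs, p.1 ∈ org ∧ p.2 ∈ org ∧ org.idxOf p.1 < org.idxOf p.2 := by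
      intro p hp
      obtain ⟨hv1, hv2⟩ := pv_pair_mem_V seqs p hp
      have ho1 : p.1 ∈ org := (hVmem p.1).mp hv1
      have ho2 : p.2 ∈ org := (hVmem p.2).mp hv2
      refine ⟨ho1, ho2, ?_⟩
      have hi2 : org.idxOf p.2 < org.length := List.idxOf_lt_length_of_mem ho2
      have hready : pvReady seqs (org.take (org.idxOf p.2)) p.2 :=
        (h1 _ hi2 p.2).mpr (by rw [List.getD_eq_getElem _ _ hi2, List.getElem_idxOf])
      have := hready.2.2 p hp rfl
      exact ((pv_mem_take_iff org _ p.1).mp this).2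
    refine ⟨hnd, hVmem, hfw, ?_⟩
    intro i hi1
    have hi : i < org.length := by omega
    have hii : i + 1 < org.length := hi1
    have hne : org.getD (i + 1) 0 ≠ org.getD i 0 := by
      rw [List.getD_eq_getElem _ _ hi, List.getD_eq_getElem _ _ hii]
      intro h
      have := List.nodup_iff_injective_getElem.mp hnd
        (a₁ := ⟨i + 1, hii⟩) (a₂ := ⟨i, hi⟩) (by simpa using h)
      simp at this
    have hnotready : ¬ pvReady seqs (org.take i) (org.getD (i + 1) 0) := by
      intro hr
      exact hne ((h1 i hi _).mp hr)
    have hmemV : org.getD (i + 1) 0 ∈ pvV seqs := by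
      rw [hVmem, List.getD_eq_getElem _ _ hii]
      exact List.getElem_mem _
    have hnotint : org.getD (i + 1) 0 ∉ org.take i := by
      rw [pv_mem_take_iff]
      rintro ⟨-, hlt⟩
      rw [List.getD_eq_getElem _ _ hii, List.Nodup.idxOf_getElem hnd _ hii] at hlt
      omega
    have hex : ∃ p ∈ pvPairs seqs, p.2 = org.getD (i + 1) 0 ∧ p.1 ∉ org.take i := by
      by_contra hno
      push Not at hno
      exact hnotready ⟨hmemV, hnotint, fun p hp h2 => hno p hp h2⟩
    obtain ⟨p, hp, hp2, hp1⟩ := hex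
    obtain ⟨ho1, ho2, hlt⟩ := hfw p hp
    have hidx2 : org.idxOf p.2 = i + 1 := by
      rw [hp2, List.getD_eq_getElem _ _ hii, List.Nodup.idxOf_getElem hnd _ hii]
    have hge : i ≤ org.idxOf p.1 := by
      by_contra habs
      exact hp1 ((pv_mem_take_iff org i p.1).mpr ⟨ho1, by omega⟩)
    have hidx1 : org.idxOf p.1 = i := by omega
    have hp1eq : p.1 = org.getD i 0 := by
      have hA : org.getD (org.idxOf p.1) 0 = p.1 := by
        rw [List.getD_eq_getElem _ _ (List.idxOf_lt_length_of_mem ho1)]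
        exact List.getElem_idxOf _
      rw [hidx1] at hA
      exact hA.symm
    rcases p with ⟨pa, pb⟩
    simp only at hp2 hp1eq
    rw [← hp1eq, ← hp2]
    exact hp
  · rintro ⟨hnd, hVmem, hfw, hcov⟩
    have hns : ∀ p ∈ pvPairs seqs, p.1 ≠ p.2 := by
      intro p hp h
      have := (hfw p hp).2.2
      rw [h] at this
      omega
    have hperm : (pvV seqs).Perm org := by
      apply List.Subperm.antisymm
      · exact List.subperm_of_subset (PySem.Set.nodup_ofList _) (fun x hx => (hVmem x).mp hx)
      · exact List.subperm_of_subset hnd (fun x hx => (hVmem x).mpr hx)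
    have hlen : (pvV seqs).length = org.length := hperm.length_eq
    refine ⟨hns, hlen, fun v hv => (hVmem v).mpr hv, ?_, ?_⟩
    · intro j hj x
      constructor
      · rintro ⟨hxV, hxT, hxp⟩
        have hxo : x ∈ org := (hVmem x).mp hxV
        have hk : org.idxOf x < org.length := List.idxOf_lt_length_of_mem hxo
        have hkge : j ≤ org.idxOf x := by
          by_contra habs
          exact hxT ((pv_mem_take_iff org j x).mpr ⟨hxo, by omega⟩)
        rcases Nat.eq_or_lt_of_le hkge with heq | hgt
        · have hA : org.getD (org.idxOf x) 0 = x := by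
            rw [List.getD_eq_getElem _ _ hk]
            exact List.getElem_idxOf _
          rw [← heq] at hA
          exact hA.symm
        · exfalso
          set k := org.idxOf x with hkdef
          have hk1 : (k - 1) + 1 < org.length := by omega
          have hpair := hcov (k - 1) hk1
          have hx2 : org.getD (k - 1 + 1) 0 = x := by
            rw [show k - 1 + 1 = k by omega, List.getD_eq_getElem _ _ hk]
            exact List.getElem_idxOf hk
          have := hxp _ hpair (by rw [hx2])
          dsimp only at this
          rw [pv_mem_take_iff] at this
          obtain ⟨-, hlt2⟩ := this
          have : org.idxOf (org.getD (k - 1) 0) = k - 1 := by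
            rw [List.getD_eq_getElem _ _ (by omega : k - 1 < org.length)]
            exact List.Nodup.idxOf_getElem hnd _ _
          omega
      · rintro rfl
        have hgo : org.getD j 0 = org[j]'hj := List.getD_eq_getElem _ _ hj
        refine ⟨?_, ?_, ?_⟩
        · rw [hVmem, hgo]
          exact List.getElem_mem _
        · rw [pv_mem_take_iff]
          rintro ⟨-, hlt⟩
          rw [hgo, List.Nodup.idxOf_getElem hnd _ hj] at hlt
          omega
        · intro p hp hp2
          obtain ⟨ho1, ho2, hlt⟩ := hfw p hp
          rw [pv_mem_take_iff]
          refine ⟨ho1, ?_⟩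
          rw [hp2, hgo, List.Nodup.idxOf_getElem hnd _ hj] at hlt
          omega
    · rintro x ⟨hxV, hxP, -⟩
      exact hxP ((hVmem _).mp hxV)

lemma pv_enum_map_snd : ∀ (l : List Int) (k : Int), (PySem.List.enumerate l k).map Prod.snd = l := by
  intro l
  induction l with
  | nil => intro k; rfl
  | cons a t ih =>
    intro k
    rw [show PySem.List.enumerate (a :: t) k = (k, a) :: PySem.List.enumerate t (k + 1) from rfl]
    simp only [List.map_cons, ih]

lemma pv_foldl_add_disjoint {α : Type} [BEq α] [LawfulBEq α] :
    ∀ (l : List α) (acc : PySem.Set α), l.Nodup → (∀ x ∈ l, x ∉ acc) →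
    l.foldl PySem.Set.add acc = acc ++ l := by
  intro l
  induction l with
  | nil => intro acc _ _; simp
  | cons a t ih =>
    intro acc hnd hdisj
    rw [List.foldl_cons, pv_add_of_not_mem acc a (hdisj a (by simp))]
    rw [ih (acc ++ [a]) (List.nodup_cons.mp hnd).2]
    · simp
    · intro x hx
      rw [List.mem_append, List.mem_singleton]
      rintro (h | h)
      · exact hdisj x (List.mem_cons_of_mem _ hx) h
      · exact (List.nodup_cons.mp hnd).1 (h ▸ hx)

lemma pv_ofList_eq_self {α : Type} [BEq α] [LawfulBEq α] (l : List α) (hnd : l.Nodup) :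
    PySem.Set.ofList l = l := by
  rw [PySem.Set.ofList_eq_foldl, pv_foldl_add_disjoint l [] hnd (by simp)]
  rfl

lemma pv_ofList_len_iff_nodup (l : List Int) :
    (PySem.Set.ofList l).length = l.length ↔ l.Nodup := by
  constructor
  · intro h
    have hsp : (PySem.Set.ofList l).Subperm l :=
      List.subperm_of_subset (PySem.Set.nodup_ofList l) (fun x hx => (PySem.Set.mem_ofList l x).mp hx)
    have hperm := hsp.perm_of_length_le (by omega)
    exact hperm.symm.nodup_iff.mpr (PySem.Set.nodup_ofList l)
  · intro h
    rw [pv_ofList_eq_self l h]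

lemma pv_vals_eq (seqs : List (List Int)) :
    seqs.foldl (fun s seq => PySem.Set.update s seq) PySem.Set.empty = pvV seqs := by
  unfold pvV
  rw [PySem.Set.ofList_eq_foldl, List.foldl_flatten]
  rfl

lemma pv_pos_frozen : ∀ (l : List Int) (k : Int) (d : PySem.Dict Int Int) (v : Int), v ∉ l →
    ((PySem.List.enumerate l k).foldl (fun d p => d.insert p.2 p.1) d).getD v 0 = d.getD v 0 := by
  intro l
  induction l with
  | nil => intro k d v _; rfl
  | cons a t ih =>
    intro k d v hv
    rw [show PySem.List.enumerate (a :: t) k = (k, a) :: PySem.List.enumerate t (k + 1) from rfl,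
      List.foldl_cons, ih (k + 1) _ v (fun h => hv (List.mem_cons_of_mem _ h))]
    exact PySem.Dict.getD_insert_of_ne _ _ _ (fun h => hv (h ▸ List.mem_cons_self ..))

lemma pv_pos_getD : ∀ (l : List Int) (k : Int) (d : PySem.Dict Int Int), l.Nodup →
    ∀ v ∈ l, ((PySem.List.enumerate l k).foldl (fun d p => d.insert p.2 p.1) d).getD v 0
      = k + (l.idxOf v : Int) := by
  intro l
  induction l with
  | nil => intro k d _ v hv; simp at hv
  | cons a t ih =>
    intro k d hnd v hv
    rw [show PySem.List.enumerate (a :: t) k = (k, a) :: PySem.List.enumerate t (k + 1) from rfl,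
      List.foldl_cons]
    by_cases hva : v = a
    · subst hva
      rw [pv_pos_frozen t (k + 1) _ v (List.nodup_cons.mp hnd).1,
        PySem.Dict.getD_insert_self, List.idxOf_cons_self]
      simp
    · have hvt : v ∈ t := by
        rcases List.mem_cons.mp hv with h | h
        · exact absurd h hva
        · exact h
      rw [ih (k + 1) _ (List.nodup_cons.mp hnd).2 v hvt,
        List.idxOf_cons_ne _ (fun h => hva h.symm)]
      push_cast
      ring

-- abstract form of B's pair loop (positions already resolved to idxOf)
def pvCovStep (org : List Int) (st : Option (List Bool)) (p : Int × Int) : Option (List Bool) :=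
  match st with
  | none => none
  | some cov =>
    if org.idxOf p.2 ≤ org.idxOf p.1 then none
    else if org.idxOf p.2 = org.idxOf p.1 + 1 then some (cov.set (org.idxOf p.1) true) else some cov

lemma pv_covstep_none (org : List Int) (ps : List (Int × Int)) :
    ps.foldl (pvCovStep org) none = none := by
  induction ps with
  | nil => rfl
  | cons p t ih => simpa [pvCovStep] using ih

lemma pv_cov_none_iff (org : List Int) (ps : List (Int × Int)) :
    ∀ cov, ps.foldl (pvCovStep org) (some cov) = none
      ↔ ∃ p ∈ ps, org.idxOf p.2 ≤ org.idxOf p.1 := by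
  induction ps with
  | nil => intro cov; simp
  | cons p t ih =>
    intro cov
    rw [List.foldl_cons]
    by_cases hle : org.idxOf p.2 ≤ org.idxOf p.1
    · rw [show pvCovStep org (some cov) p = none by simp [pvCovStep, hle], pv_covstep_none]
      simp only [true_iff]
      exact ⟨p, List.mem_cons_self .., hle⟩
    · have hstep : pvCovStep org (some cov) p
          = some (if org.idxOf p.2 = org.idxOf p.1 + 1 then cov.set (org.idxOf p.1) true else cov) := by
        simp only [pvCovStep, if_neg hle]
        split <;> simp_all
      rw [hstep, ih]
      constructor
      · rintro ⟨q, hq, h⟩; exact ⟨q, List.mem_cons_of_mem _ hq, h⟩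
      · rintro ⟨q, hq, h⟩
        rcases List.mem_cons.mp hq with rfl | hq'
        · exact absurd h hle
        · exact ⟨q, hq', h⟩

lemma pv_cov_some (org : List Int) (ps : List (Int × Int)) :
    ∀ cov, (∀ p ∈ ps, org.idxOf p.1 < org.idxOf p.2) →
    ∃ cov', ps.foldl (pvCovStep org) (some cov) = some cov' ∧ cov'.length = cov.length ∧
      ∀ j : Nat, cov'.getD j false
        = (cov.getD j false ||
           (ps.any (fun p => decide (org.idxOf p.1 = j) && decide (org.idxOf p.2 = j + 1))
             && decide (j < cov.length))) := by
  induction ps with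
  | nil =>
    intro cov _
    exact ⟨cov, rfl, rfl, by simp⟩
  | cons p t ih =>
    intro cov hfw
    have hlt := hfw p (List.mem_cons_self ..)
    rw [List.foldl_cons, show pvCovStep org (some cov) p
        = some (if org.idxOf p.2 = org.idxOf p.1 + 1 then cov.set (org.idxOf p.1) true else cov) by
      simp only [pvCovStep, if_neg (by omega : ¬ org.idxOf p.2 ≤ org.idxOf p.1)]
      split <;> simp_all]
    set cov1 := if org.idxOf p.2 = org.idxOf p.1 + 1 then cov.set (org.idxOf p.1) true else cov with hcov1
    obtain ⟨cov', hfold, hlen, hget⟩ := ih cov1 (fun q hq => hfw q (List.mem_cons_of_mem _ hq))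
    have hlen1 : cov1.length = cov.length := by
      rw [hcov1]; split <;> simp
    refine ⟨cov', hfold, by omega, ?_⟩
    intro j
    rw [hget j, hlen1]
    have hc1get : cov1.getD j false
        = (cov.getD j false ||
           ((decide (org.idxOf p.1 = j) && decide (org.idxOf p.2 = j + 1)) && decide (j < cov.length))) := by
      rw [hcov1]
      by_cases he : org.idxOf p.2 = org.idxOf p.1 + 1
      · rw [if_pos he]
        by_cases hj : org.idxOf p.1 = j
        · subst hj
          simp only [decide_true, he, Bool.true_and]
          by_cases hb : org.idxOf p.1 < cov.length
          · rw [List.getD_eq_getElem _ _ (by simpa using hb), List.getElem_set_self]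
            simp [hb]
          · rw [List.getD_eq_getElem?_getD, List.getElem?_set, if_pos rfl, if_neg hb,
              List.getD_eq_getElem?_getD]
            simp [hb]
        · rw [List.getD_eq_getElem?_getD, List.getElem?_set, if_neg hj, ← List.getD_eq_getElem?_getD]
          simp [hj]
      · rw [if_neg he]
        by_cases h1 : org.idxOf p.1 = j
        · subst h1; simp [he]
        · simp [h1]
    rw [hc1get]
    simp only [List.any_cons, Bool.and_or_distrib_right, Bool.or_assoc]

lemma pv_all_getD (cov : List Bool) :
    (cov.all (fun c => c) = true) ↔ ∀ j, j < cov.length → cov.getD j false = true := by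
  rw [List.all_eq_true]
  constructor
  · intro h j hj
    rw [List.getD_eq_getElem _ _ hj]
    exact h cov[j] (List.getElem_mem hj)
  · intro h b hb
    obtain ⟨j, hj, rfl⟩ := List.mem_iff_getElem.mp hb
    have := h j hj
    rwa [List.getD_eq_getElem _ _ hj] at this

lemma pv_getD_replicate (m j : Nat) : (List.replicate m false).getD j false = false := by
  rw [List.getD_eq_getElem?_getD, List.getElem?_replicate]
  split <;> rfl

lemma pv_B_char (org : List Int) (seqs : List (List Int)) (hs : seqs ≠ []) :
    is_unique_sequence_alt org seqs = true ↔ pvC org seqs := by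
  rw [is_unique_sequence_alt, if_neg (by simpa [List.isEmpty_iff] using hs)]
  have hkeys : ((PySem.List.enumerate org).foldl (fun d p => d.insert p.2 p.1)
      (PySem.Dict.empty : PySem.Dict Int Int)).keys = PySem.Set.ofList org := by
    rw [PySem.Dict.keys_foldl_insert_key (PySem.List.enumerate org) (fun p => p.2)
      (fun d p => p.1) PySem.Dict.empty, PySem.Dict.keys_empty]
    rw [show (PySem.List.enumerate org).map (fun p => p.2) = org from pv_enum_map_snd org 0]
    rfl
  have hsize : ((PySem.List.enumerate org).foldl (fun d p => d.insert p.2 p.1)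
      (PySem.Dict.empty : PySem.Dict Int Int)).size = (PySem.Set.ofList org).length := by
    rw [show ∀ d : PySem.Dict Int Int, d.size = d.keys.length from fun d => by
      simp [PySem.Dict.size, PySem.Dict.keys], hkeys]
  by_cases hnd : org.Nodup
  · rw [if_neg (by rw [hsize, (pv_ofList_len_iff_nodup org).mpr hnd]; exact fun h => h rfl)]
    rw [pv_vals_eq seqs]
    have hcontains : ∀ v : Int, ((PySem.List.enumerate org).foldl (fun d p => d.insert p.2 p.1)
        (PySem.Dict.empty : PySem.Dict Int Int)).contains v = true ↔ v ∈ org := by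
      intro v
      rw [PySem.Dict.contains_iff_mem_keys, hkeys, PySem.Set.mem_ofList]
    by_cases hVok : (pvV seqs).length = org.length ∧ ∀ v ∈ pvV seqs, v ∈ org
    · rw [if_neg (by
        intro hcond
        rw [Bool.or_eq_true] at hcond
        rcases hcond with h | h
        · rw [decide_eq_true_eq] at h
          exact h (by simp [PySem.Set.len, hVok.1])
        · rw [List.any_eq_true] at h
          obtain ⟨v, hv, hvb⟩ := h
          have := (hcontains v).mpr (hVok.2 v hv)
          simp [this] at hvb)]
      have hVmem : ∀ x, x ∈ pvV seqs ↔ x ∈ org := by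
        have hperm : (pvV seqs).Perm org :=
          (List.subperm_of_subset (PySem.Set.nodup_ofList _) hVok.2).perm_of_length_le
            (le_of_eq hVok.1.symm)
        exact fun x => hperm.mem_iff
      have hpm : ∀ p ∈ pvPairs seqs, p.1 ∈ org ∧ p.2 ∈ org := by
        intro p hp
        obtain ⟨h1, h2⟩ := pv_pair_mem_V seqs p hp
        exact ⟨(hVmem _).mp h1, (hVmem _).mp h2⟩
      have hposD : ∀ v ∈ org, ((PySem.List.enumerate org).foldl (fun d p => d.insert p.2 p.1)
          (PySem.Dict.empty : PySem.Dict Int Int)).getD v 0 = (org.idxOf v : Int) := by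
        intro v hv
        rw [pv_pos_getD org 0 _ hnd v hv]
        simp
      rw [pv_foldl_pairs]
      have hcongr : ∀ (init : Option (List Bool)),
          (pvPairs seqs).foldl (fun st p =>
            match st with
            | none => none
            | some cov =>
              if ((PySem.List.enumerate org).foldl (fun d p => d.insert p.2 p.1)
                    (PySem.Dict.empty : PySem.Dict Int Int)).getD p.1 0
                  ≥ ((PySem.List.enumerate org).foldl (fun d p => d.insert p.2 p.1)
                    (PySem.Dict.empty : PySem.Dict Int Int)).getD p.2 0 then none
              else if ((PySem.List.enumerate org).foldl (fun d p => d.insert p.2 p.1)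
                    (PySem.Dict.empty : PySem.Dict Int Int)).getD p.2 0
                  == ((PySem.List.enumerate org).foldl (fun d p => d.insert p.2 p.1)
                    (PySem.Dict.empty : PySem.Dict Int Int)).getD p.1 0 + 1 then
                some (cov.set (((PySem.List.enumerate org).foldl (fun d p => d.insert p.2 p.1)
                    (PySem.Dict.empty : PySem.Dict Int Int)).getD p.1 0).toNat true)
              else some cov) init
          = (pvPairs seqs).foldl (pvCovStep org) init := by
        intro init
        apply PySem.List.foldl_congr_mem
        intro acc p hp
        rcases acc with _ | cov
        · rfl
        · obtain ⟨h1, h2⟩ := hpm p hp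
          rw [hposD p.1 h1, hposD p.2 h2]
          simp only [pvCovStep, ge_iff_le, Nat.cast_le, beq_iff_eq, Int.toNat_natCast,
            show ((org.idxOf p.2 : Int) = (org.idxOf p.1 : Int) + 1)
                ↔ org.idxOf p.2 = org.idxOf p.1 + 1 from by
              constructor <;> intro h <;> exact_mod_cast h]
      by_cases hfw : ∀ p ∈ pvPairs seqs, org.idxOf p.1 < org.idxOf p.2
      · obtain ⟨cov', hfold, hlen', hget⟩ :=
          pv_cov_some org (pvPairs seqs) (List.replicate (org.length - 1) false) hfw
        rw [hcongr, hfold]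
        have hlenr : cov'.length = org.length - 1 := by
          rw [hlen', List.length_replicate]
        have hcov_iff : ∀ j : Nat, j + 1 < org.length →
            (((pvPairs seqs).any (fun p =>
                decide (org.idxOf p.1 = j) && decide (org.idxOf p.2 = j + 1))) = true
              ↔ (org.getD j 0, org.getD (j + 1) 0) ∈ pvPairs seqs) := by
          intro j hj
          rw [List.any_eq_true]
          constructor
          · rintro ⟨p, hp, hcond⟩
            simp only [Bool.and_eq_true, decide_eq_true_eq] at hcond
            obtain ⟨hc1, hc2⟩ := hcond
            obtain ⟨ho1, ho2⟩ := hpm p hp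
            rcases p with ⟨pa, pb⟩
            simp only at hc1 hc2 ho1 ho2
            have hA : org.getD j 0 = pa := by
              rw [← hc1, List.getD_eq_getElem _ _ (List.idxOf_lt_length_of_mem ho1)]
              exact List.getElem_idxOf _
            have hB : org.getD (j + 1) 0 = pb := by
              rw [← hc2, List.getD_eq_getElem _ _ (List.idxOf_lt_length_of_mem ho2)]
              exact List.getElem_idxOf _
            rw [hA, hB]
            exact hp
          · intro hp
            refine ⟨_, hp, ?_⟩
            simp only [Bool.and_eq_true, decide_eq_true_eq]
            constructor
            · rw [List.getD_eq_getElem _ _ (by omega : j < org.length)]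
              exact List.Nodup.idxOf_getElem hnd _ _
            · rw [List.getD_eq_getElem _ _ hj]
              exact List.Nodup.idxOf_getElem hnd _ _
        rw [pv_all_getD]
        constructor
        · intro hB
          refine ⟨hnd, hVmem, fun p hp => ⟨(hpm p hp).1, (hpm p hp).2, hfw p hp⟩, ?_⟩
          intro i hi
          have hi' : i < cov'.length := by omega
          have := hB i hi'
          rw [hget i, pv_getD_replicate, Bool.false_or, Bool.and_eq_true] at this
          exact (hcov_iff i hi).mp this.1
        · rintro ⟨-, -, -, hcov⟩
          intro j hj
          have hj' : j + 1 < org.length := by omega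
          rw [hget j, pv_getD_replicate, Bool.false_or, Bool.and_eq_true]
          refine ⟨(hcov_iff j hj').mpr (hcov j hj'), by simpa [List.length_replicate] using (by omega : j < org.length - 1)⟩
      · push Not at hfw
        obtain ⟨p, hp, hle⟩ := hfw
        rw [hcongr, (pv_cov_none_iff org (pvPairs seqs) _).mpr ⟨p, hp, by omega⟩]
        simp only [Bool.false_eq_true, false_iff]
        rintro ⟨-, -, hfw', -⟩
        have := (hfw' p hp).2.2
        omega
    · rw [if_pos (by
        push Not at hVok
        by_cases hlen : (pvV seqs).length = org.length
        · obtain ⟨v, hv, hvo⟩ := hVok hlen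
          simp only [Bool.or_eq_true, List.any_eq_true]
          right
          refine ⟨v, hv, ?_⟩
          simp only [Bool.not_eq_eq_eq_not, Bool.not_true]
          rw [← Bool.not_eq_true, hcontains v]
          exact hvo
        · simp only [Bool.or_eq_true]
          left
          simpa [PySem.Set.len] using hlen)]
      simp only [Bool.false_eq_true, false_iff]
      rintro ⟨hnd', hVmem, -, -⟩
      have hperm : (pvV seqs).Perm org := by
        apply List.Subperm.antisymm
        · exact List.subperm_of_subset (PySem.Set.nodup_ofList _) (fun x hx => (hVmem x).mp hx)
        · exact List.subperm_of_subset hnd' (fun x hx => (hVmem x).mpr hx)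
      exact hVok ⟨hperm.length_eq, fun v hv => (hVmem v).mp hv⟩
  · rw [if_pos (by
      rw [hsize]
      intro h
      exact hnd ((pv_ofList_len_iff_nodup org).mp h))]
    simp only [Bool.false_eq_true, false_iff]
    rintro ⟨hnd', -⟩
    exact hnd hnd'

-- ===== VERDICT (by name: the statement is the Claim_ definition above) =====
theorem is_unique_sequence_spec : Claim_equal_is_unique_sequence := by
  intro org seqs _
  unfold Spec_is_unique_sequence
  by_cases hs : seqs = []
  · subst hs; rfl
  · have h1 := pv_A_char org seqs hs
    have h2 := pv_B_char org seqs hs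
    have h3 := pv_R_iff_C org seqs
    rw [Bool.eq_iff_iff, h1, h2, h3]
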